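-- pv_equiv track=rewrite | github.com/obhalerao/cs6120-assignments | minisynth/ex3.py | desugar_hole
-- ===== SOURCE A (Python) =====
-- import itertools
--
-- def desugar_hole(source, free_vars):
--     choose_var_template = '+'.join(
--         itertools.chain(
--             (f'(hbool_{i}_{{0}} ? {var} : 0)' for i, var in enumerate(free_vars)),
--             ['hconst_{0}']
--         )
--     )
--
--     parts = source.split('??')
--     out = []
--     for (i, part) in enumerate(parts[:-1]):
--         out.append(part)
--         out.append(f'({choose_var_template})'.format(i))
--     out.append(parts[-1])
--     return ''.join(out)
-- ===== SOURCE B (Python) =====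
-- def desugar_hole(source, free_vars):
--     def choose(k):
--         terms = [f'(hbool_{i}_{k} ? {var} : 0)' for i, var in enumerate(free_vars)]
--         terms.append(f'hconst_{k}')
--         return '(' + '+'.join(terms) + ')'
--
--     out = []
--     k = 0
--     i = 0
--     n = len(source)
--     while i < n:
--         if source[i] == '?' and i + 1 < n and source[i + 1] == '?':
--             out.append(choose(k))
--             k += 1
--             i += 2
--         else:
--             out.append(source[i])
--             i += 1
--     return ''.join(out)
-- ===== Notes on version B (the rewrite author's own statement) =====
-- stated objective: alternative
-- what changed: A splits the source on '??', builds a '{0}'-placeholder template once and str.format-instantiates it per part before joining; B makes one left-to-right character scan with a hole counter and emits each hole's choose-expression built directly for that index (no template, no str.format).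
-- outside the precondition, e.g. on desugar_hole('a??b', ['{']): A raises ValueError, B returns 'a((hbool_0_0 ? { : 0)+hconst_0)b'
import Mathlib
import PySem

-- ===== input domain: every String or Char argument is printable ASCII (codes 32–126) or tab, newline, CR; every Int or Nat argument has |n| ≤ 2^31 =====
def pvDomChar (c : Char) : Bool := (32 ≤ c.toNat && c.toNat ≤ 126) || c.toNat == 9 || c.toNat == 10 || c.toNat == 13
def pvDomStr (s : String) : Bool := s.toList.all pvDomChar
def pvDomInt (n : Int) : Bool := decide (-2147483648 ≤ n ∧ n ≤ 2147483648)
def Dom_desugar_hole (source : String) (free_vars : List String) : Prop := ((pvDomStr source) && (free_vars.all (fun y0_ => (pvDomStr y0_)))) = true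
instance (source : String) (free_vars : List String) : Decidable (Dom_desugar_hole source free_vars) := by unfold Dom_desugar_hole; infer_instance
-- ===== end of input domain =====

-- B replaces A's split('??')/format-template/join pipeline by a single left-to-right scan
-- with a counter that emits each hole's choose-expression directly (no '{0}' template,
-- no str.format); objective: alternative decomposition, same linear cost.

-- ===== PORT A =====
-- f'(hbool_{i}_{{0}} ? {var} : 0)'
def pvPieceA (p : Int × String) : List Char :=
  "(hbool_".toList ++ PySem.Int.toChars p.1 ++ "_{0} ? ".toList ++ p.2.toList ++ " : 0)".toList

def desugar_hole (source : String) (free_vars : List String) : String :=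
  let choose_var_template : List Char :=
    PySem.Chars.join "+".toList
      ((PySem.List.enumerate free_vars).map pvPieceA ++ ["hconst_{0}".toList])
  let parts := PySem.Chars.splitOn source.toList "??".toList
  -- f'({choose_var_template})'.format(i): inside Pre_ (free_vars brace-free) the only brace
  -- sequences in the template are the '{0}' placeholders, so .format(i) is exactly the
  -- replacement of every '{0}' by str(i); ported as Chars.replace (exact under Pre_).
  let out : List (List Char) :=
    (PySem.List.enumerate (PySem.List.slice parts none (some (-1)))).foldl
      (fun out p =>
        out ++ [p.2,
          PySem.Chars.replace ('(' :: choose_var_template ++ [')']) "{0}".toList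
            (PySem.Int.toChars p.1)])
      []
  -- parts[-1]: split never returns an empty list, so the .getD default is never used
  let out := out ++ [(PySem.List.pyGet? parts (-1)).getD []]
  String.ofList (PySem.Chars.join [] out)

-- ===== PORT B =====
-- choose(k): the instantiated expression for hole number k, built directly
def pvChooseB (free_vars : List String) (k : Int) : List Char :=
  let terms : List (List Char) :=
    (PySem.List.enumerate free_vars).map (fun p =>
      "(hbool_".toList ++ PySem.Int.toChars p.1 ++ "_".toList ++ PySem.Int.toChars k
        ++ " ? ".toList ++ p.2.toList ++ " : 0)".toList)
  let terms := terms ++ ["hconst_".toList ++ PySem.Int.toChars k]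
  '(' :: PySem.Chars.join "+".toList terms ++ [')']

-- the while loop: source[i] == '?' and i+1 < n and source[i+1] == '?'
def pvScanB (free_vars : List String) : List Char → Int → List (List Char)
  | [], _ => []
  | [c], _ => [[c]]
  | c1 :: c2 :: rest, k =>
    if c1 = '?' ∧ c2 = '?' then pvChooseB free_vars k :: pvScanB free_vars rest (k + 1)
    else [c1] :: pvScanB free_vars (c2 :: rest) k

def desugar_hole_alt (source : String) (free_vars : List String) : String :=
  String.ofList (PySem.Chars.join [] (pvScanB free_vars source.toList 0))

-- ===== PRECONDITION & SPEC =====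
-- Pre_ excludes inputs whose source contains a hole '??' while some free variable
-- contains '{' or '}': there str.format either raises (ValueError) or substitutes brace
-- sequences occurring inside the variable name, an artefact of Python's format
-- mini-language that no caller of this desugarer relies on.
def Pre_desugar_hole (source : String) (free_vars : List String) : Prop :=
  PySem.Str.isIn "??" source = true → ∀ v ∈ free_vars, '{' ∉ v.toList ∧ '}' ∉ v.toList
instance (source : String) (free_vars : List String) : Decidable (Pre_desugar_hole source free_vars) := by
  unfold Pre_desugar_hole; infer_instance

def pvWitness_desugar_hole : String × List String := ("x + ?? * y??", ["x", "y"])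

def Spec_desugar_hole (source : String) (free_vars : List String) (out : String) : Prop := out = desugar_hole_alt source free_vars
instance (source : String) (free_vars : List String) (out : String) : Decidable (Spec_desugar_hole source free_vars out) := by unfold Spec_desugar_hole; infer_instance

-- ===== CLAIM (what is proved, stated in full; the proofs are below) =====
def Claim_equal_desugar_hole : Prop := ∀ (source : String) (free_vars : List String), Dom_desugar_hole source free_vars → Pre_desugar_hole source free_vars → Spec_desugar_hole source free_vars (desugar_hole source free_vars)

-- ===== LEMMAS AND PROOFS =====
def pvRep (new : List Char) : List Char → List Char
  | [] => []
  | c :: t =>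
    if ['{', '0', '}'].isPrefixOf (c :: t) then new ++ pvRep new (t.drop 2)
    else c :: pvRep new t
termination_by l => l.length
decreasing_by all_goals simp

theorem pvRep_go (new : List Char) :
    ∀ (fuel : Nat) (l acc : List Char), l.length ≤ fuel →
      PySem.Chars.replace.go ['{', '0', '}'] new fuel l acc = acc.reverse ++ pvRep new l := by
  intro fuel
  induction fuel with
  | zero => intro l acc h; have : l = [] := by cases l <;> simp_all
            subst this; simp [PySem.Chars.replace.go, pvRep]
  | succ n ih =>
    intro l acc h
    cases l with
    | nil => simp [PySem.Chars.replace.go, pvRep]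
    | cons c t =>
      rw [PySem.Chars.replace.go]
      by_cases hp : List.isPrefixOf ['{', '0', '}'] (c :: t) = true
      · rw [if_pos hp, ih]
        · rw [pvRep, if_pos hp]
          simp
        · simp at h ⊢; omega
      · rw [if_neg hp, ih]
        · rw [pvRep, if_neg hp]; simp
        · simp at h; omega
def pvSpl : List Char → List (List Char)
  | [] => [[]]
  | c :: t =>
    if ['?', '?'].isPrefixOf (c :: t) then [] :: pvSpl (t.drop 1)
    else (pvSpl t).modifyHead (c :: ·)
termination_by l => l.length
decreasing_by all_goals simp

theorem pvReplace_eq (l new : List Char) :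
    PySem.Chars.replace l "{0}".toList new = pvRep new l := by
  have hold : ("{0}".toList : List Char) = ['{', '0', '}'] := rfl
  rw [PySem.Chars.replace, hold]
  rw [if_neg (by simp)]
  rw [pvRep_go new l.length l [] (le_refl _)]
  simp

theorem pvSpl_ne_nil (l : List Char) : pvSpl l ≠ [] := by
  induction l using pvSpl.induct with
  | case1 => simp [pvSpl]
  | case2 c t h ih => simp [pvSpl, h]
  | case3 c t h ih => rw [pvSpl, if_neg h]; cases hs : pvSpl t <;> simp_all

theorem pvSpl_no_sep (l : List Char) (h : ¬ (['?', '?'] <:+: l)) : pvSpl l = [l] := by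
  induction l using pvSpl.induct with
  | case1 => simp [pvSpl]
  | case2 c t hp ih =>
    exact absurd ((List.isPrefixOf_iff_prefix.mp hp).isInfix) h
  | case3 c t hp ih =>
    have hct : t <:+: c :: t := (List.suffix_cons c t).isInfix
    rw [pvSpl, if_neg hp, ih (fun hinf => h (hinf.trans hct))]
    rfl

theorem pvSpl_go :
    ∀ (fuel : Nat) (l cur : List Char) (acc : List (List Char)), l.length ≤ fuel →
      PySem.Chars.splitOn.go ['?', '?'] fuel l cur acc
        = acc.reverse ++ (pvSpl l).modifyHead (cur.reverse ++ ·) := by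
  intro fuel
  induction fuel with
  | zero => intro l cur acc h
            have : l = [] := by cases l <;> simp_all
            subst this; simp [PySem.Chars.splitOn.go, pvSpl]
  | succ n ih =>
    intro l cur acc h
    cases l with
    | nil => simp [PySem.Chars.splitOn.go, pvSpl]
    | cons c t =>
      rw [PySem.Chars.splitOn.go]
      by_cases hp : List.isPrefixOf ['?', '?'] (c :: t) = true
      · rw [if_pos hp, ih]
        · rw [pvSpl, if_pos hp]
          simp
          cases pvSpl t.tail <;> simp
        · simp at h ⊢; omega
      · rw [if_neg hp, ih]
        · rw [pvSpl, if_neg hp]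
          obtain ⟨p, ps, hps⟩ : ∃ p ps, pvSpl t = p :: ps := by
            cases hs : pvSpl t with
            | nil => exact absurd hs (pvSpl_ne_nil t)
            | cons p ps => exact ⟨p, ps, rfl⟩
          rw [hps]; simp
        · simp at h; omega

theorem pvSplitOn_eq (l : List Char) :
    PySem.Chars.splitOn l "??".toList = pvSpl l := by
  have h := pvSpl_go (l.length + 1) l [] [] (by omega)
  have hsep : ("??".toList : List Char) = ['?', '?'] := rfl
  show PySem.Chars.splitOn.go _ _ _ _ _ = _
  rw [hsep, h]
  obtain ⟨p, ps, hps⟩ : ∃ p ps, pvSpl l = p :: ps := by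
    cases hs : pvSpl l with
    | nil => exact absurd hs (pvSpl_ne_nil l)
    | cons p ps => exact ⟨p, ps, rfl⟩
  rw [hps]; simp

theorem pvJoin_nil_eq_flatten (ps : List (List Char)) : PySem.Chars.join [] ps = ps.flatten := by
  induction ps with
  | nil => simp [PySem.Chars.join_nil]
  | cons p ps ih =>
    cases ps with
    | nil => simp [PySem.Chars.join_singleton]
    | cons q r => rw [PySem.Chars.join_cons_cons]; simp_all

def pvWeave (f : Int → List Char) : List (List Char) → Int → List (List Char)
  | [], _ => []
  | p :: ps, j => p :: f j :: pvWeave f ps (j + 1)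

theorem pvFoldA (f : Int → List Char) :
    ∀ (ps : List (List Char)) (j : Int) (acc : List (List Char)),
      (PySem.List.enumerate ps j).foldl (fun out p => out ++ [p.2, f p.1]) acc
        = acc ++ pvWeave f ps j := by
  intro ps
  induction ps with
  | nil => intro j acc; simp [PySem.List.enumerate, pvWeave]
  | cons p ps ih =>
    intro j acc
    rw [PySem.List.enumerate, pvWeave]
    simp only [List.foldl_cons, ih]
    simp

theorem pvWeave_congr (f g : Int → List Char) :
    ∀ (ps : List (List Char)) (j : Int), (∀ i, j ≤ i → f i = g i) →
      pvWeave f ps j = pvWeave g ps j := by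
  intro ps
  induction ps with
  | nil => intro j h; rfl
  | cons p ps ih =>
    intro j h
    rw [pvWeave, pvWeave, h j (le_refl _), ih (j + 1) (fun i hi => h i (by omega))]

def pvGlue (f : Int → List Char) : List (List Char) → Int → List Char
  | [], _ => []
  | [p], _ => p
  | p :: q :: ps, j => p ++ f j ++ pvGlue f (q :: ps) (j + 1)


theorem pvGetLast_cons {α : Type} (q : α) (r : List α) (d : α) :
    (q :: r).getLast?.getD d = r.getLast?.getD q := by
  cases hr : r.getLast? with
  | none => simp [List.getLast?_eq_none_iff] at hr; subst hr; rfl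
  | some x =>
    have : (q :: r).getLast? = some x := by
      cases r with
      | nil => simp at hr
      | cons a b => rw [List.getLast?_cons_cons]; exact hr
    simp [this]

theorem pvAssembleA (f : Int → List Char) :
    ∀ (ps : List (List Char)), ps ≠ [] → ∀ (j : Int),
      (pvWeave f ps.dropLast j).flatten ++ ps.getLastD [] = pvGlue f ps j := by
  intro ps
  induction ps with
  | nil => intro h; exact absurd rfl h
  | cons p ps ih =>
    intro _ j
    cases ps with
    | nil => simp [pvWeave, pvGlue]
    | cons q r =>
      rw [List.dropLast_cons₂, pvWeave, pvGlue]
      simp only [List.flatten_cons, List.getLastD_cons]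
      rw [← ih (by simp) (j + 1)]
      simp only [List.append_assoc, List.append_cancel_left_eq]
      simp only [List.getLastD_eq_getLast?]
      rw [pvGetLast_cons]

theorem pvSlice_neg_one {α : Type} (xs : List α) :
    PySem.List.slice xs none (some (-1)) = xs.dropLast := by
  cases xs with
  | nil => rfl
  | cons x t =>
    simp only [PySem.List.slice, PySem.List.clampIdx]
    norm_num
    rw [if_neg (by omega), List.dropLast_eq_take]
    simp

theorem pvScan_glue (fvs : List String) :
    ∀ (n : Nat) (cs : List Char), cs.length ≤ n → ∀ (k : Int),
      (pvScanB fvs cs k).flatten = pvGlue (pvChooseB fvs) (pvSpl cs) k := by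
  intro n
  induction n with
  | zero =>
    intro cs h k
    have : cs = [] := by cases cs <;> simp_all
    subst this; simp [pvScanB, pvSpl, pvGlue]
  | succ n ih =>
    intro cs h k
    match cs with
    | [] => simp [pvScanB, pvSpl, pvGlue]
    | [c] =>
      have hnp : ['?', '?'].isPrefixOf ([c] : List Char) = false := by simp [List.isPrefixOf]
      rw [pvScanB, pvSpl, if_neg (by simp [hnp])]
      simp [pvSpl, pvGlue]
    | c1 :: c2 :: rest =>
      by_cases hq : c1 = '?' ∧ c2 = '?'
      · obtain ⟨h1, h2⟩ := hq
        subst h1; subst h2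
        rw [pvScanB]
        rw [if_pos ⟨rfl, rfl⟩]
        rw [pvSpl, if_pos (by simp [List.isPrefixOf])]
        simp only [List.flatten_cons]
        rw [ih rest (by simp at h; omega) (k + 1)]
        simp only [List.drop_succ_cons, List.drop_zero]
        obtain ⟨p, ps, hps⟩ : ∃ p ps, pvSpl rest = p :: ps := by
          cases hs : pvSpl rest with
          | nil => exact absurd hs (pvSpl_ne_nil _)
          | cons p ps => exact ⟨p, ps, rfl⟩
        rw [hps, pvGlue]
        simp
      · rw [pvScanB, if_neg hq]
        rw [pvSpl, if_neg (by simp [List.isPrefixOf]; intro a b; exact hq ⟨a.symm, b.symm⟩)]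
        simp only [List.flatten_cons]
        rw [ih (c2 :: rest) (by simp at h ⊢; omega) k]
        obtain ⟨p, ps, hps⟩ : ∃ p ps, pvSpl (c2 :: rest) = p :: ps := by
          cases hs : pvSpl (c2 :: rest) with
          | nil => exact absurd hs (pvSpl_ne_nil _)
          | cons p ps => exact ⟨p, ps, rfl⟩
        rw [hps]
        cases ps with
        | nil => simp [pvGlue]
        | cons q r => simp [pvGlue]


def pvWv (m : List Char) : List (List Char) → List Char
  | [] => []
  | [s] => s
  | s :: s' :: ss => s ++ m ++ pvWv m (s' :: ss)

def pvSegs : List (Int × String) → List Char → List (List Char)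
  | [], pref => [pref ++ "hconst_".toList, [')']]
  | (i, v) :: l, pref =>
    (pref ++ "(hbool_".toList ++ PySem.Int.toChars i ++ "_".toList)
      :: pvSegs l (" ? ".toList ++ v.toList ++ " : 0)+".toList)

theorem pvSegs_ne_nil (l : List (Int × String)) (pref : List Char) : pvSegs l pref ≠ [] := by
  cases l with
  | nil => simp [pvSegs]
  | cons p l => cases p; simp [pvSegs]

theorem pvJoin_cons (sep x : List Char) (xs : List (List Char)) (h : xs ≠ []) :
    PySem.Chars.join sep (x :: xs) = x ++ sep ++ PySem.Chars.join sep xs := by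
  cases xs with
  | nil => exact absurd rfl h
  | cons y ys => exact PySem.Chars.join_cons_cons sep x y ys

theorem pvWv_cons (m s : List Char) (ss : List (List Char)) (h : ss ≠ []) :
    pvWv m (s :: ss) = s ++ m ++ pvWv m ss := by
  cases ss with
  | nil => exact absurd rfl h
  | cons s' ss' => rfl

theorem pvWvA (l : List (Int × String)) (pref : List Char) :
    pref ++ PySem.Chars.join "+".toList (l.map pvPieceA ++ ["hconst_{0}".toList]) ++ [')']
      = pvWv ['{', '0', '}'] (pvSegs l pref) := by
  induction l generalizing pref with
  | nil =>
    rw [pvSegs]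
    simp only [List.map_nil, List.nil_append, PySem.Chars.join_singleton]
    rw [pvWv]
    show _ = _ ++ _ ++ pvWv _ [[')']]
    rw [pvWv]
    have : ("hconst_{0}".toList : List Char)
        = "hconst_".toList ++ ['{', '0', '}'] := rfl
    rw [this]; simp
  | cons p l ih =>
    obtain ⟨i, v⟩ := p
    rw [pvSegs]
    rw [pvWv_cons _ _ _ (pvSegs_ne_nil _ _)]
    rw [← ih (" ? ".toList ++ v.toList ++ " : 0)+".toList)]
    simp only [List.map_cons, List.cons_append]
    rw [pvJoin_cons _ _ _ (by simp)]
    show pref ++ (pvPieceA (i, v) ++ "+".toList ++ _) ++ _ = _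
    have hpiece : pvPieceA (i, v)
        = ("(hbool_".toList ++ PySem.Int.toChars i ++ "_".toList) ++ ['{', '0', '}']
            ++ (" ? ".toList ++ v.toList ++ " : 0)".toList) := by
      simp [pvPieceA]
    rw [hpiece]
    have hplus : (" : 0)".toList : List Char) ++ "+".toList = " : 0)+".toList := rfl
    simp [List.append_assoc]

theorem pvWvB (k : Int) (l : List (Int × String)) (pref : List Char) :
    pref ++ PySem.Chars.join "+".toList
        (l.map (fun p => "(hbool_".toList ++ PySem.Int.toChars p.1 ++ "_".toList
            ++ PySem.Int.toChars k ++ " ? ".toList ++ p.2.toList ++ " : 0)".toList)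
          ++ ["hconst_".toList ++ PySem.Int.toChars k]) ++ [')']
      = pvWv (PySem.Int.toChars k) (pvSegs l pref) := by
  induction l generalizing pref with
  | nil =>
    rw [pvSegs]
    simp only [List.map_nil, List.nil_append, PySem.Chars.join_singleton]
    rw [pvWv]
    show _ = _ ++ _ ++ pvWv _ [[')']]
    rw [pvWv]
    simp
  | cons p l ih =>
    obtain ⟨i, v⟩ := p
    rw [pvSegs]
    rw [pvWv_cons _ _ _ (pvSegs_ne_nil _ _)]
    rw [← ih (" ? ".toList ++ v.toList ++ " : 0)+".toList)]
    simp only [List.map_cons, List.cons_append]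
    rw [pvJoin_cons _ _ _ (by simp)]
    simp [List.append_assoc]

theorem pvRep_no_brace (new : List Char) (s : List Char) (hs : '{' ∉ s) (t : List Char) :
    pvRep new (s ++ t) = s ++ pvRep new t := by
  induction s with
  | nil => simp
  | cons c s ih =>
    have hc : c ≠ '{' := by intro h; exact hs (by simp [h])
    rw [List.cons_append, pvRep, if_neg (by simp [List.isPrefixOf]; intro h; exact absurd h.symm hc)]
    rw [ih (by intro h; exact hs (by simp [h]))]
    simp

theorem pvRep_marker (new t : List Char) :
    pvRep new ('{' :: '0' :: '}' :: t) = new ++ pvRep new t := by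
  rw [pvRep, if_pos (by simp [List.isPrefixOf])]
  simp

theorem pvWv_rep (new : List Char) :
    ∀ (segs : List (List Char)), segs ≠ [] → (∀ s ∈ segs, '{' ∉ s) →
      pvRep new (pvWv ['{', '0', '}'] segs) = pvWv new segs := by
  intro segs
  induction segs with
  | nil => intro h; exact absurd rfl h
  | cons s ss ih =>
    intro _ hmem
    cases ss with
    | nil =>
      rw [pvWv, pvWv]
      have := pvRep_no_brace new s (hmem s (by simp)) []
      simpa [pvRep] using this
    | cons s' ss' =>
      rw [pvWv_cons ['{', '0', '}'] s (s' :: ss') (by simp),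
          pvWv_cons new s (s' :: ss') (by simp)]
      rw [List.append_assoc, pvRep_no_brace new s (hmem s (by simp))]
      rw [show (['{', '0', '}'] : List Char) ++ pvWv ['{', '0', '}'] (s' :: ss')
            = '{' :: '0' :: '}' :: pvWv ['{', '0', '}'] (s' :: ss') from rfl]
    -- marker then rest
      rw [pvRep_marker]
      rw [ih (by simp) (fun x hx => hmem x (by simp [hx]))]
      simp

theorem pvDigitChar_ne (m : Nat) : Nat.digitChar m ≠ '{' := by
  by_cases h : m < 16
  · interval_cases m <;> decide
  · have : Nat.digitChar m = '*' := by
      unfold Nat.digitChar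
      rw [if_neg (by omega), if_neg (by omega), if_neg (by omega), if_neg (by omega), if_neg (by omega), if_neg (by omega), if_neg (by omega), if_neg (by omega), if_neg (by omega), if_neg (by omega), if_neg (by omega), if_neg (by omega), if_neg (by omega), if_neg (by omega), if_neg (by omega), if_neg (by omega)]
    simp [this]

theorem pvToDigitsCore_no_brace (b : Nat) :
    ∀ (fuel n : Nat) (ds : List Char), '{' ∉ ds → '{' ∉ Nat.toDigitsCore b fuel n ds := by
  intro fuel
  induction fuel with
  | zero => intro n ds h; rw [Nat.toDigitsCore]; exact h
  | succ f ih =>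
    intro n ds h
    rw [Nat.toDigitsCore]
    split
    · intro hmem
      rcases List.mem_cons.mp hmem with h1 | h2
      · exact pvDigitChar_ne _ h1.symm
      · exact h h2
    · refine ih _ _ ?_
      intro hmem
      rcases List.mem_cons.mp hmem with h1 | h2
      · exact pvDigitChar_ne _ h1.symm
      · exact h h2

theorem pvToChars_no_brace (i : Int) : '{' ∉ PySem.Int.toChars i := by
  rw [PySem.Int.toChars]
  split
  · intro hmem
    rcases List.mem_cons.mp hmem with h1 | h2
    · exact absurd h1 (by decide)
    · exact pvToDigitsCore_no_brace 10 _ _ [] (by simp) h2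
  · exact pvToDigitsCore_no_brace 10 _ _ [] (by simp)

theorem pvSegs_no_brace (l : List (Int × String)) (pref : List Char)
    (hp : '{' ∉ pref) (hl : ∀ p ∈ l, '{' ∉ p.2.toList) :
    ∀ s ∈ pvSegs l pref, '{' ∉ s := by
  induction l generalizing pref with
  | nil =>
    intro s hs
    rw [pvSegs] at hs
    rcases List.mem_cons.mp hs with h1 | h2
    · subst h1
      intro hmem
      rcases List.mem_append.mp hmem with h | h
      · exact hp h
      · revert h; decide
    · simp at h2; subst h2; decide
  | cons p l ih =>
    obtain ⟨i, v⟩ := p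
    intro s hs
    rw [pvSegs] at hs
    rcases List.mem_cons.mp hs with h1 | h2
    · subst h1
      intro hmem
      rcases List.mem_append.mp hmem with h | h
      · rcases List.mem_append.mp h with h' | h'
        · rcases List.mem_append.mp h' with h'' | h''
          · exact hp h''
          · revert h''; decide
        · exact pvToChars_no_brace i h'
      · revert h; decide
    · refine ih _ ?_ (fun q hq => hl q (by simp [hq])) s h2
      intro hmem
      rcases List.mem_append.mp hmem with h | h
      · rcases List.mem_append.mp h with h' | h'
        · revert h'; decide
        · exact hl (i, v) (by simp) h'
      · revert h; decide

theorem pvMem_enumerate {α : Type} :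
    ∀ (xs : List α) (j : Int) (p : Int × α), p ∈ PySem.List.enumerate xs j → j ≤ p.1 ∧ p.2 ∈ xs := by
  intro xs
  induction xs with
  | nil => intro j p h; simp [PySem.List.enumerate] at h
  | cons x t ih =>
    intro j p h
    rw [PySem.List.enumerate] at h
    rcases List.mem_cons.mp h with h1 | h2
    · subst h1; simp
    · have := ih (j + 1) p h2
      exact ⟨by omega, by simp [this.2]⟩

theorem pvTemplate_eq (free_vars : List String)
    (hfv : ∀ v ∈ free_vars, '{' ∉ v.toList) (k : Int) :
    pvRep (PySem.Int.toChars k)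
        ('(' :: PySem.Chars.join "+".toList
            ((PySem.List.enumerate free_vars).map pvPieceA ++ ["hconst_{0}".toList]) ++ [')'])
      = pvChooseB free_vars k := by
  have hA := pvWvA (PySem.List.enumerate free_vars) ['(']
  have hB := pvWvB k (PySem.List.enumerate free_vars) ['(']
  have hpre : ('(' : Char) :: PySem.Chars.join "+".toList
        ((PySem.List.enumerate free_vars).map pvPieceA ++ ["hconst_{0}".toList]) ++ [')']
      = ['('] ++ PySem.Chars.join "+".toList
        ((PySem.List.enumerate free_vars).map pvPieceA ++ ["hconst_{0}".toList]) ++ [')'] := by simp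
  rw [hpre, hA]
  rw [pvWv_rep _ _ (pvSegs_ne_nil _ _) ?_]
  · rw [← hB]
    rw [pvChooseB]
    simp
  · exact pvSegs_no_brace _ _ (by decide)
      (fun p hp => hfv p.2 (pvMem_enumerate free_vars 0 p hp).2)

theorem pvGetNegOne {α : Type} (xs : List α) (d : α) (h : xs ≠ []) :
    (PySem.List.pyGet? xs (-1)).getD d = xs.getLastD d := by
  cases xs with
  | nil => exact absurd rfl h
  | cons x t =>
    simp [PySem.List.pyGet?, PySem.List.pyIdx?]
    rw [List.getLast?_eq_getElem?]
    simp

-- ===== VERDICT (by name: the statement is the Claim_ definition above) =====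
theorem desugar_hole_spec : Claim_equal_desugar_hole := by
  intro source free_vars _ hpre
  unfold Spec_desugar_hole
  rw [desugar_hole, desugar_hole_alt]
  by_cases hin : PySem.Str.isIn "??" source = true
  case neg =>
    have hninf : ¬ ((['?', '?'] : List Char) <:+: source.toList) := by
      intro hinf
      exact hin (by simp [pysem]; exact hinf)
    rw [pvSplitOn_eq, pvSpl_no_sep source.toList hninf, pvSlice_neg_one,
        pvJoin_nil_eq_flatten (pvScanB free_vars source.toList 0),
        pvScan_glue free_vars source.toList.length source.toList (le_refl _) 0,
        pvSpl_no_sep source.toList hninf]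
    simp [PySem.List.pyGet?, PySem.List.pyIdx?, pvGlue]
  have hfv : ∀ v ∈ free_vars, '{' ∉ v.toList := fun v hv => (hpre hin v hv).1
  have hf : ∀ i : Int,
      PySem.Chars.replace
          ('(' :: PySem.Chars.join "+".toList
              ((PySem.List.enumerate free_vars).map pvPieceA ++ ["hconst_{0}".toList]) ++ [')'])
          "{0}".toList (PySem.Int.toChars i)
        = pvChooseB free_vars i := by
    intro i
    rw [pvReplace_eq]
    exact pvTemplate_eq free_vars hfv i
  rw [pvSplitOn_eq, pvSlice_neg_one]
  rw [pvFoldA (fun i : Int =>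
        PySem.Chars.replace
          ('(' :: PySem.Chars.join "+".toList
              ((PySem.List.enumerate free_vars).map pvPieceA ++ ["hconst_{0}".toList]) ++ [')'])
          "{0}".toList (PySem.Int.toChars i))
      ((pvSpl source.toList).dropLast) 0 []]
  rw [pvWeave_congr _ (pvChooseB free_vars) _ 0 (fun i _ => hf i)]
  rw [pvJoin_nil_eq_flatten, pvJoin_nil_eq_flatten]
  rw [List.flatten_append]
  simp only [List.flatten_cons, List.flatten_nil, List.append_nil, List.nil_append]
  rw [pvGetNegOne _ _ (pvSpl_ne_nil source.toList)]
  rw [pvAssembleA (pvChooseB free_vars) (pvSpl source.toList) (pvSpl_ne_nil source.toList) 0]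
  rw [pvScan_glue free_vars source.toList.length source.toList (le_refl _) 0]
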